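-- pv_equiv track=rewrite | github.com/sachaheroux/interface_backend | fms_lots_chargement_heuristique.py | assign_clusters_to_groups_LPT
-- ===== SOURCE A (Python) =====
-- def assign_clusters_to_groups_LPT(clusters, g_j, Pj, mj):
--     """Étape 3: Assignation des clusters aux groupes avec LPT"""
--     group_assignments = []
--
--     for i, machine_clusters in enumerate(clusters):
--         # Trier les clusters selon LPT (Longest Processing Time first)
--         machine_clusters = sorted(machine_clusters, key=lambda x: x[1], reverse=True)
--
--         # Initialiser ψ (psi) pour chaque groupe - temps disponible
--         psi_values = [Pj[i] * (mj[i] // g_j[i]) for _ in range(g_j[i])]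
--
--         current_group_assignments = [[] for _ in range(g_j[i])]
--
--         for cluster in machine_clusters:
--             # Trouver le groupe avec le plus de temps disponible
--             max_psi_index = psi_values.index(max(psi_values))
--
--             # Assigner le cluster à ce groupe
--             current_group_assignments[max_psi_index].append(cluster[0])
--
--             # Mettre à jour le temps disponible pour ce groupe
--             psi_values[max_psi_index] -= cluster[1]
--
--         group_assignments.append(current_group_assignments)
--
--     return group_assignments
-- ===== SOURCE B (Python) =====
-- def _push(pq, item):
--     # insert item into the ascending list pq, keeping it sorted
--     i = 0
--     while i < len(pq) and pq[i] < item: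
--         i += 1
--     return pq[:i] + [item] + pq[i:]
--
--
-- def assign_clusters_to_groups_LPT(clusters, g_j, Pj, mj):
--     """LPT assignment via an ascending (load, group) priority list.
--
--     The per-group capacity Pj[i] * (mj[i] // g_j[i]) is the same for every
--     group of a machine, so the group with the most remaining time is exactly
--     the group with the least assigned load (first index on ties): Pj and mj
--     cancel out of the selection entirely.
--     """
--     result = []
--     for i, machine_clusters in enumerate(clusters):
--         g = g_j[i]
--         order = sorted(machine_clusters, key=lambda x: x[1], reverse=True)
--         pq = [(0, k) for k in range(g)]  # (load, group index), kept ascending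
--         groups = [[] for _ in range(g)]
--         for c in order:
--             load, k = pq[0]
--             groups[k].append(c[0])
--             pq = _push(pq[1:], (load + c[1], k))
--         result.append(groups)
--     return result
-- ===== Notes on version B (the rewrite author's own statement) =====
-- stated objective: alternative
-- what changed: Replaces the per-cluster max()+.index() scans over mutable per-group capacities with an ascending (load, group-index) priority list popped at the head and maintained by ordered re-insertion, exploiting that the uniform capacity Pj[i]*(mj[i]//g_j[i]) cancels out of the selection so Pj and mj never influence the result.
import Mathlib
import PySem

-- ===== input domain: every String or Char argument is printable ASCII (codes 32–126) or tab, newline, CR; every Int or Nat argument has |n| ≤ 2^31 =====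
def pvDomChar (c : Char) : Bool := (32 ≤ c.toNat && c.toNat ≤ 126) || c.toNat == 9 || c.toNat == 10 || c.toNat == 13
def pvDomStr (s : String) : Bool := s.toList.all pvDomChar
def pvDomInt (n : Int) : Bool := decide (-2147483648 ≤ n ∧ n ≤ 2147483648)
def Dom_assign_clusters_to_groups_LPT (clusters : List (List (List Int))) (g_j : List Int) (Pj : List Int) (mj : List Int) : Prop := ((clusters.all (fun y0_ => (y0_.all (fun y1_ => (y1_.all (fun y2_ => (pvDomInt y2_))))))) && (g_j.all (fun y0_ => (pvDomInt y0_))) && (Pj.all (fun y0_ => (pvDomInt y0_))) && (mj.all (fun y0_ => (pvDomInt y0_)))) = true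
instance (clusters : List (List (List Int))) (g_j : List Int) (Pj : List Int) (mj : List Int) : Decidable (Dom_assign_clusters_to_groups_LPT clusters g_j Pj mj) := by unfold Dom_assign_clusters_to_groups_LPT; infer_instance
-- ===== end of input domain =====

-- B replaces A's per-cluster max()+.index() scans over mutable per-group capacities by an
-- ascending (load, group-index) priority list popped at the head and maintained by ordered
-- re-insertion; the uniform per-group capacity Pj[i]*(mj[i]//g_j[i]) cancels out of the
-- selection, so B never reads Pj or mj (objective: alternative algorithm, same cost).

-- ===== PORT A =====
-- one iteration of A's inner 'for cluster in machine_clusters' loop; state = (psi_values, current_group_assignments)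
-- Python raises ValueError on max([]) (g_j[i] ≤ 0 with clusters present): excluded by Pre_, the 'none' branches are unreachable there
def pvAStep (st : List Int × List (List Int)) (cluster : List Int) : List Int × List (List Int) :=
  match PySem.List.max? st.1 (fun v => v) with
  | none => st
  | some m =>
    match PySem.List.index? st.1 m with
    | none => st
    | some j =>
      let c0 := PySem.List.pyGetD cluster 0 0      -- cluster[0]; len ≥ 2 under Pre_, so the default is unreachable
      let c1 := PySem.List.pyGetD cluster 1 0      -- cluster[1]
      (st.1.set j (st.1.getD j 0 - c1), st.2.set j (st.2.getD j [] ++ [c0]))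

-- one iteration of A's outer loop (body for machine i, with g = g_j[i], P = Pj[i], m = mj[i])
def pvAMachine (g P m : Int) (mcs : List (List Int)) : List (List Int) :=
  let sc := PySem.List.sorted mcs (fun x => PySem.List.pyGetD x 1 0) true
  let psi0 := (PySem.List.pyRange 0 g 1).map (fun _ => P * PySem.Int.floordiv m g)
  let gr0 := (PySem.List.pyRange 0 g 1).map (fun _ => ([] : List Int))
  (sc.foldl pvAStep (psi0, gr0)).2

def assign_clusters_to_groups_LPT (clusters : List (List (List Int))) (g_j : List Int) (Pj : List Int) (mj : List Int) : List (List (List Int)) :=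
  (PySem.List.enumerate clusters 0).foldl
    (fun acc p => acc ++ [pvAMachine (PySem.List.pyGetD g_j p.1 0) (PySem.List.pyGetD Pj p.1 0) (PySem.List.pyGetD mj p.1 0) p.2]) []

-- ===== PORT B =====
-- Python tuple comparison (a, b) < (c, d)
def pvLexLt (p q : Int × Int) : Bool := p.1 < q.1 || (p.1 == q.1 && p.2 < q.2)

-- Source B's _push: the while loop computes the insertion index i (= length of the prefix of
-- elements < item), then returns pq[:i] + [item] + pq[i:]
def pvPush (item : Int × Int) (pq : List (Int × Int)) : List (Int × Int) :=
  let i := (pq.takeWhile (fun p => pvLexLt p item)).length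
  pq.take i ++ item :: pq.drop i

-- one iteration of Source B's inner loop; state = (pq, groups); pq empty ⇔ Python's pq[0] raises (outside Pre_)
def pvBStep (st : List (Int × Int) × List (List Int)) (c : List Int) : List (Int × Int) × List (List Int) :=
  match st.1 with
  | [] => st
  | (load, k) :: rest =>
    let c0 := PySem.List.pyGetD c 0 0
    let c1 := PySem.List.pyGetD c 1 0
    (pvPush (load + c1, k) rest, PySem.List.pySetD st.2 k (PySem.List.pyGetD st.2 k [] ++ [c0]))

def pvBMachine (g : Int) (mcs : List (List Int)) : List (List Int) :=
  let sc := PySem.List.sorted mcs (fun x => PySem.List.pyGetD x 1 0) true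
  let pq0 := (PySem.List.pyRange 0 g 1).map (fun k => ((0 : Int), k))
  let gr0 := (PySem.List.pyRange 0 g 1).map (fun _ => ([] : List Int))
  (sc.foldl pvBStep (pq0, gr0)).2

def assign_clusters_to_groups_LPT_alt (clusters : List (List (List Int))) (g_j : List Int) (Pj : List Int) (mj : List Int) : List (List (List Int)) :=
  (PySem.List.enumerate clusters 0).foldl
    (fun acc p => acc ++ [pvBMachine (PySem.List.pyGetD g_j p.1 0) p.2]) []

-- ===== PRECONDITION & SPEC =====
-- Exactly the inputs on which Python A returns: g_j reaches every machine, every cluster has ≥ 2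
-- entries (sort key x[1] and cluster[0]/cluster[1]), a machine with clusters has g_j[i] > 0
-- (else max([]) raises ValueError), and when g_j[i] > 0 the capacities Pj[i], mj[i] exist.
def Pre_assign_clusters_to_groups_LPT (clusters : List (List (List Int))) (g_j : List Int) (Pj : List Int) (mj : List Int) : Prop :=
  clusters.length ≤ g_j.length ∧
  ∀ i ∈ List.range clusters.length,
    (∀ c ∈ clusters.getD i [], 2 ≤ c.length) ∧
    (clusters.getD i [] ≠ [] → 0 < g_j.getD i 0) ∧
    (0 < g_j.getD i 0 → i < Pj.length ∧ i < mj.length)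
instance (clusters : List (List (List Int))) (g_j : List Int) (Pj : List Int) (mj : List Int) : Decidable (Pre_assign_clusters_to_groups_LPT clusters g_j Pj mj) := by unfold Pre_assign_clusters_to_groups_LPT; infer_instance

def pvWitness_assign_clusters_to_groups_LPT : List (List (List Int)) × List Int × List Int × List Int :=
  ([[[1, 5], [2, 3], [3, 4], [4, 5]], []], [2, 0], [10, 0], [4, 0])

def Spec_assign_clusters_to_groups_LPT (clusters : List (List (List Int))) (g_j : List Int) (Pj : List Int) (mj : List Int) (out : List (List (List Int))) : Prop := out = assign_clusters_to_groups_LPT_alt clusters g_j Pj mj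
instance (clusters : List (List (List Int))) (g_j : List Int) (Pj : List Int) (mj : List Int) (out : List (List (List Int))) : Decidable (Spec_assign_clusters_to_groups_LPT clusters g_j Pj mj out) := by unfold Spec_assign_clusters_to_groups_LPT; infer_instance

-- ===== CLAIM (what is proved, stated in full; the proofs are below) =====
def Claim_equal_assign_clusters_to_groups_LPT : Prop := ∀ (clusters : List (List (List Int))) (g_j : List Int) (Pj : List Int) (mj : List Int), Dom_assign_clusters_to_groups_LPT clusters g_j Pj mj → Pre_assign_clusters_to_groups_LPT clusters g_j Pj mj → Spec_assign_clusters_to_groups_LPT clusters g_j Pj mj (assign_clusters_to_groups_LPT clusters g_j Pj mj)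

-- ===== LEMMAS AND PROOFS =====

-- the coupling: B's priority list is (a sorted arrangement of) the pairs (C - psi[j], j)
def pvKeys (C : Int) (psi : List Int) : List (Int × Int) :=
  psi.zipIdx.map (fun vi => (C - vi.1, (vi.2 : Int)))

-- pvLexLt as a Prop, for Pairwise
def pvPLt (p q : Int × Int) : Prop := pvLexLt p q = true

theorem pvPLt_iff (p q : Int × Int) : pvPLt p q ↔ (p.1 < q.1 ∨ (p.1 = q.1 ∧ p.2 < q.2)) := by
  simp [pvPLt, pvLexLt]

theorem pvPLt_trans {p q r : Int × Int} (h1 : pvPLt p q) (h2 : pvPLt q r) : pvPLt p r := by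
  rw [pvPLt_iff] at *; omega

theorem pvPLt_total {p q : Int × Int} (h : ¬ pvPLt p q) (hne : p.2 ≠ q.2) : pvPLt q p := by
  rw [pvPLt_iff] at *; omega

theorem length_pvKeys (C : Int) (psi : List Int) : (pvKeys C psi).length = psi.length := by
  simp [pvKeys]

theorem getElem_pvKeys (C : Int) (psi : List Int) (j : Nat) (h : j < psi.length) :
    (pvKeys C psi)[j]'(by simpa [length_pvKeys] using h) = (C - psi[j], (j : Int)) := by
  simp [pvKeys]

theorem mem_pvKeys_iff (C : Int) (psi : List Int) (p : Int × Int) :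
    p ∈ pvKeys C psi ↔ ∃ j, ∃ _ : j < psi.length, p = (C - psi[j], (j : Int)) := by
  rw [List.mem_iff_getElem]
  constructor
  · rintro ⟨j, hj, rfl⟩
    exact ⟨j, by simpa [length_pvKeys] using hj, by rw [getElem_pvKeys]⟩
  · rintro ⟨j, hj, rfl⟩
    exact ⟨j, by simpa [length_pvKeys] using hj, by rw [getElem_pvKeys]⟩

theorem pvKeys_set (C : Int) (psi : List Int) (j : Nat) (x : Int) (h : j < psi.length) :
    pvKeys C (psi.set j x) = (pvKeys C psi).set j (C - x, (j : Int)) := by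
  apply List.ext_getElem
  · simp [length_pvKeys]
  · intro i h1 h2
    have hi : i < psi.length := by simpa [length_pvKeys] using h2
    rw [getElem_pvKeys C _ i (by simpa using hi), List.getElem_set, List.getElem_set]
    by_cases hij : j = i
    · simp [hij]
    · simp [hij]
      exact (getElem_pvKeys C psi i hi).symm

theorem nodup_snd_pvKeys (C : Int) (psi : List Int) : ((pvKeys C psi).map Prod.snd).Nodup := by
  have h : (pvKeys C psi).map Prod.snd = (List.range psi.length).map (fun j : Nat => (j : Int)) := by
    apply List.ext_getElem <;> simp [pvKeys]
  rw [h]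
  exact List.Nodup.map (fun a b hab => by exact_mod_cast hab) List.nodup_range

-- pvPush permutes item into the list
theorem pvPush_eq (item : Int × Int) (pq : List (Int × Int)) :
    pvPush item pq = pq.takeWhile (fun p => pvLexLt p item) ++ item :: pq.dropWhile (fun p => pvLexLt p item) := by
  induction pq with
  | nil => rfl
  | cons p rest ih =>
      by_cases hp : pvLexLt p item
      · simp [pvPush, hp] at ih ⊢
        exact ih
      · simp [pvPush, hp]

theorem pvPush_perm (item : Int × Int) (pq : List (Int × Int)) :
    (pvPush item pq).Perm (item :: pq) := by
  rw [pvPush_eq]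
  calc (pq.takeWhile (fun p => pvLexLt p item) ++ item :: pq.dropWhile (fun p => pvLexLt p item)).Perm
        (item :: (pq.takeWhile (fun p => pvLexLt p item) ++ pq.dropWhile (fun p => pvLexLt p item))) := List.perm_middle
    _ = (item :: pq) := by rw [List.takeWhile_append_dropWhile]

theorem pvPush_sorted (item : Int × Int) (pq : List (Int × Int))
    (hs : pq.Pairwise pvPLt) (hd : ∀ p ∈ pq, p.2 ≠ item.2) :
    (pvPush item pq).Pairwise pvPLt := by
  rw [pvPush_eq]
  set P := fun p => pvLexLt p item with hP
  have hsplit : pq.takeWhile P ++ pq.dropWhile P = pq := List.takeWhile_append_dropWhile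
  have hs' : (pq.takeWhile P ++ pq.dropWhile P).Pairwise pvPLt := by rw [hsplit]; exact hs
  rw [List.pairwise_append] at hs'
  obtain ⟨hT, hD, hTD⟩ := hs'
  have hitem_lt : ∀ q ∈ pq.dropWhile P, pvPLt item q := by
    cases hcase : pq.dropWhile P with
    | nil => simp
    | cons d0 D' =>
        have hd0pq : d0 ∈ pq := by
          have hmem : d0 ∈ pq.dropWhile P := by rw [hcase]; exact List.mem_cons_self
          exact (List.dropWhile_sublist P).mem hmem
        have hne : pq.dropWhile P ≠ [] := by simp [hcase]
        have hhead := List.head_dropWhile_not P hne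
        have hd0' : P d0 = false := by
          have h2 : (pq.dropWhile P).head hne = d0 := by simp [hcase]
          rw [h2] at hhead; exact hhead
        have hd0 : ¬ pvPLt d0 item := by
          rw [hP] at hd0'
          simp [pvPLt, hd0']
        have h0 : pvPLt item d0 := pvPLt_total hd0 (hd d0 hd0pq)
        intro q hq
        rcases List.mem_cons.mp hq with rfl | hq'
        · exact h0
        · have hDp := hD
          rw [hcase] at hDp
          exact pvPLt_trans h0 ((List.pairwise_cons.mp hDp).1 q hq')
  rw [List.pairwise_append]
  refine ⟨hT, List.pairwise_cons.mpr ⟨hitem_lt, hD⟩, ?_⟩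
  intro a ha b hb
  rcases List.mem_cons.mp hb with rfl | hb'
  · have := List.mem_takeWhile_imp ha
    simpa [pvPLt, hP] using this
  · exact hTD a ha b hb'

-- characterise A's selection (max + first index) from B's sorted head
theorem pvHead_facts (C : Int) (psi : List Int) (l k : Int) (rest : List (Int × Int))
    (hperm : ((l, k) :: rest).Perm (pvKeys C psi))
    (hsort : ((l, k) :: rest).Pairwise pvPLt) :
    ∃ j : Nat, ∃ _ : j < psi.length, k = (j : Int) ∧ psi[j] = C - l ∧
      PySem.List.max? psi (fun v => v) = some (C - l) ∧
      PySem.List.index? psi (C - l) = some j := by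
  have hmem : (l, k) ∈ pvKeys C psi := hperm.subset List.mem_cons_self
  obtain ⟨j, hj, hpair⟩ := (mem_pvKeys_iff C psi (l, k)).mp hmem
  have hk : k = (j : Int) := congrArg Prod.snd hpair
  have hl : psi[j] = C - l := by
    have := congrArg Prod.fst hpair
    simp at this; omega
  have hrest_lt : ∀ q ∈ rest, pvPLt (l, k) q := (List.pairwise_cons.mp hsort).1
  have hmax : ∀ y ∈ psi, y ≤ C - l := by
    intro y hy
    obtain ⟨i, hi, rfl⟩ := List.mem_iff_getElem.mp hy
    have hpmem : (C - psi[i], (i : Int)) ∈ pvKeys C psi := (mem_pvKeys_iff C psi _).mpr ⟨i, hi, rfl⟩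
    have hin2 : (C - psi[i], (i : Int)) ∈ (l, k) :: rest := hperm.symm.subset hpmem
    rcases List.mem_cons.mp hin2 with heq | hin
    · have := congrArg Prod.fst heq; simp at this; omega
    · have := (pvPLt_iff _ _).mp (hrest_lt _ hin); simp at this; omega
  have hfirst : ∀ i : Nat, ∀ _ : i < psi.length, i < j → psi[i] ≠ C - l := by
    intro i hi hij hcontra
    have hpmem : (C - psi[i], (i : Int)) ∈ pvKeys C psi := (mem_pvKeys_iff C psi _).mpr ⟨i, hi, rfl⟩
    have hin2 : (C - psi[i], (i : Int)) ∈ (l, k) :: rest := hperm.symm.subset hpmem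
    rcases List.mem_cons.mp hin2 with heq | hin
    · have := congrArg Prod.snd heq; simp [hk] at this; omega
    · have := (pvPLt_iff _ _).mp (hrest_lt _ hin)
      simp [hk, hcontra] at this
      omega
  refine ⟨j, hj, hk, hl, ?_, ?_⟩
  · cases hm : PySem.List.max? psi (fun v => v) with
    | none =>
        rw [PySem.List.max?_eq_none_iff] at hm
        subst hm; simp at hj
    | some m =>
        have hm_mem : m ∈ psi := PySem.List.max?_mem hm
        have hm_max : ∀ y ∈ psi, y ≤ m := by
          have := PySem.List.max?_isMax hm; simpa using this
        have h1 : m ≤ C - l := hmax m hm_mem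
        have h2 : C - l ≤ m := by
          have hmem2 : psi[j] ∈ psi := List.getElem_mem hj
          rw [hl] at hmem2; exact hm_max _ hmem2
        rw [show m = C - l by omega]
  · rw [PySem.List.index?_eq_some_iff]
    refine ⟨psi.take j, psi.drop (j + 1), ?_, ?_, ?_⟩
    · rw [← hl, ← List.set_eq_take_cons_drop psi[j] hj]; simp
    · simp [List.length_take]; omega
    · intro hmem'
      rw [List.mem_take_iff_getElem] at hmem'
      obtain ⟨i, hi, heq⟩ := hmem'
      exact hfirst i (by omega) (by omega) heq

-- the coupled folds produce the same group lists
theorem pvFold_eq (cs : List (List Int)) (C : Int) :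
    ∀ (psi : List Int) (pq : List (Int × Int)) (G : List (List Int)),
    pq.Perm (pvKeys C psi) → pq.Pairwise pvPLt →
    (cs.foldl pvAStep (psi, G)).2 = (cs.foldl pvBStep (pq, G)).2 := by
  induction cs with
  | nil => intro psi pq G _ _; rfl
  | cons c cs ih =>
      intro psi pq G hperm hsort
      match pq with
      | [] =>
          have hkeys : pvKeys C psi = [] := hperm.symm.eq_nil
          have hpsi : psi = [] := by
            have := length_pvKeys C psi
            rw [hkeys] at this
            exact List.eq_nil_of_length_eq_zero this.symm
          subst hpsi
          have h0 : PySem.List.max? ([] : List Int) (fun v => v) = none :=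
            (PySem.List.max?_eq_none_iff _ _).mpr rfl
          have hA : pvAStep (([] : List Int), G) c = ([], G) := by
            simp [pvAStep, h0]
          have hB : pvBStep (([] : List (Int × Int)), G) c = ([], G) := rfl
          simp only [List.foldl_cons, hA, hB]
          exact ih [] [] G (by simp [pvKeys]) (by simp)
      | (l, k) :: rest =>
          obtain ⟨j, hj, hk, hl, hmax, hidx⟩ := pvHead_facts C psi l k rest hperm hsort
          subst hk
          have hjk : j < (pvKeys C psi).length := by rw [length_pvKeys]; exact hj
          have hidx' : List.idxOf? (C - l) psi = some j := by
            rw [← PySem.List.index?_eq_idxOf?]; exact hidx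
          have hg2 : psi[j]?.getD 0 = C - l := by
            rw [List.getElem?_eq_getElem hj, Option.getD_some, hl]
          have hA : pvAStep (psi, G) c =
              (psi.set j ((C - l) - PySem.List.pyGetD c 1 0),
               G.set j (G.getD j [] ++ [PySem.List.pyGetD c 0 0])) := by
            simp [pvAStep, hmax, hidx', hg2]
          have hB : pvBStep ((l, (j : Int)) :: rest, G) c =
              (pvPush (l + PySem.List.pyGetD c 1 0, (j : Int)) rest,
               G.set j (G.getD j [] ++ [PySem.List.pyGetD c 0 0])) := by
            simp [pvBStep, PySem.List.pySetD_natCast, PySem.List.pyGetD_natCast]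
          have hkeyj : (pvKeys C psi)[j]'hjk = (l, (j : Int)) := by
            rw [getElem_pvKeys C psi j hj, hl]
            have h2 : C - (C - l) = l := by omega
            rw [h2]
          have hsplitK : pvKeys C psi =
              (pvKeys C psi).take j ++ (l, (j : Int)) :: (pvKeys C psi).drop (j + 1) := by
            conv_lhs => rw [← List.set_getElem_self (as := pvKeys C psi) (h := hjk)]
            rw [hkeyj, List.set_eq_take_cons_drop _ hjk]
          have hmid : (pvKeys C psi).Perm
              ((l, (j : Int)) :: ((pvKeys C psi).take j ++ (pvKeys C psi).drop (j + 1))) := by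
            nth_rewrite 1 [hsplitK]
            exact List.perm_middle
          have hrest : rest.Perm ((pvKeys C psi).take j ++ (pvKeys C psi).drop (j + 1)) :=
            (hperm.trans hmid).cons_inv
          set c1 := PySem.List.pyGetD c 1 0 with hc1
          have hkeys' : pvKeys C (psi.set j ((C - l) - c1)) =
              (pvKeys C psi).take j ++ (l + c1, (j : Int)) :: (pvKeys C psi).drop (j + 1) := by
            rw [pvKeys_set C psi j _ hj]
            have h2 : C - (C - l - c1) = l + c1 := by omega
            rw [h2, List.set_eq_take_cons_drop _ hjk]
          have hperm' : (pvPush (l + c1, (j : Int)) rest).Perm (pvKeys C (psi.set j ((C - l) - c1))) := by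
            rw [hkeys']
            exact (pvPush_perm _ _).trans ((hrest.cons _).trans List.perm_middle.symm)
          have hnd : ∀ p ∈ rest, p.2 ≠ ((j : Nat) : Int) := by
            have hnodup : (((l, (j : Int)) :: rest).map Prod.snd).Nodup :=
              ((hperm.map Prod.snd).nodup_iff).mpr (nodup_snd_pvKeys C psi)
            simp only [List.map_cons, List.nodup_cons] at hnodup
            intro p hp hpe
            exact hnodup.1 (by rw [← hpe]; exact List.mem_map_of_mem hp)
          have hsort' : (pvPush (l + c1, (j : Int)) rest).Pairwise pvPLt :=
            pvPush_sorted _ rest (List.pairwise_cons.mp hsort).2 (by intro p hp; simpa using hnd p hp)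
          simp only [List.foldl_cons, hA, hB]
          exact ih _ _ _ hperm' hsort'

theorem pvMachine_eq (g P m : Int) (mcs : List (List Int)) :
    pvAMachine g P m mcs = pvBMachine g mcs := by
  unfold pvAMachine pvBMachine
  apply pvFold_eq _ (P * PySem.Int.floordiv m g)
  · -- the initial priority list IS the key list of the initial capacities
    have heq : (PySem.List.pyRange 0 g 1).map (fun k => ((0 : Int), k)) =
        pvKeys (P * PySem.Int.floordiv m g)
          ((PySem.List.pyRange 0 g 1).map (fun _ => P * PySem.Int.floordiv m g)) := by
      apply List.ext_getElem
      · simp [length_pvKeys]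
      · intro i h1 h2
        have hi : i < (PySem.List.pyRange 0 g 1).length := by simpa using h1
        rw [getElem_pvKeys _ _ i (by simpa using hi)]
        simp [PySem.List.getElem_pyRange_one 0 g i hi]
    rw [← heq]
  · rw [List.pairwise_map]
    apply List.Pairwise.imp ?_ (PySem.List.pairwise_lt_pyRange_one 0 g)
    intro a b hab
    rw [pvPLt_iff]
    simp [hab]

theorem pvOuter_eq (clusters : List (List (List Int))) (g_j Pj mj : List Int) :
    assign_clusters_to_groups_LPT clusters g_j Pj mj = assign_clusters_to_groups_LPT_alt clusters g_j Pj mj := by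
  unfold assign_clusters_to_groups_LPT assign_clusters_to_groups_LPT_alt
  rw [PySem.List.foldl_append_singleton_eq_map, PySem.List.foldl_append_singleton_eq_map]
  exact List.map_eq_map_iff.mpr (fun p _ => pvMachine_eq _ _ _ _)

-- ===== VERDICT (by name: the statement is the Claim_ definition above) =====
theorem assign_clusters_to_groups_LPT_spec : Claim_equal_assign_clusters_to_groups_LPT := by
  intro clusters g_j Pj mj _ _
  unfold Spec_assign_clusters_to_groups_LPT
  exact pvOuter_eq clusters g_j Pj mj
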